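-- pv_equiv track=rewrite | github.com/Alfred-N/casanovo | _OUR_SCRIPTS/convert_pq_to_mzML.py | translate_modifications
-- ===== SOURCE A (Python) =====
-- def translate_modifications(sequence):
--     # Mapping of modifications from dataset to model expected format
--     modification_mapping = {
--         "C(+57.02)": "C+57.021",
--         "M(+15.99)": "M+15.995",
--         "N(+.98)": "N+0.984",
--         "Q(+.98)": "Q+0.984",
--         # Add more mappings as necessary
--     }
--
--     for original, translated in modification_mapping.items():
--         sequence = sequence.replace(original, translated)
--
--     return sequence
-- ===== SOURCE B (Python) =====
-- # table of (dataset token, model token) modification pairs, tried in order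
-- _MOD_PAIRS = (("C(+57.02)", "C+57.021"), ("M(+15.99)", "M+15.995"),
--               ("N(+.98)", "N+0.984"), ("Q(+.98)", "Q+0.984"))
--
--
-- def translate_modifications(sequence):
--     out = []
--     i = 0
--     n = len(sequence)
--     while i < n:
--         for key, val in _MOD_PAIRS:
--             if sequence.startswith(key, i):
--                 out.append(val)
--                 i += len(key)
--                 break
--         else:
--             out.append(sequence[i])
--             i += 1
--     return "".join(out)
-- ===== Notes on version B (the rewrite author's own statement) =====
-- stated objective: alternative
-- what changed: Replaces four sequential full-string .replace passes by one single left-to-right scan that tries the four tokens at each position and copies characters between matches into an output buffer.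
import Mathlib
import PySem

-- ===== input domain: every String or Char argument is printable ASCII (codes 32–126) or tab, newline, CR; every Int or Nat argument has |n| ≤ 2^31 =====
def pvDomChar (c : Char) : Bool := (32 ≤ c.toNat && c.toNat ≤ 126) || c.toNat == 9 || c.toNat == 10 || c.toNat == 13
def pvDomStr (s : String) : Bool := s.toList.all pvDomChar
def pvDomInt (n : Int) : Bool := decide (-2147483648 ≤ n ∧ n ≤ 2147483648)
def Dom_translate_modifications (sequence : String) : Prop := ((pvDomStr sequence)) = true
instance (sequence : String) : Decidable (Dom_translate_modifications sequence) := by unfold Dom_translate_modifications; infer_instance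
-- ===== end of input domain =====

-- B replaces A's four sequential full-string replace passes by one left-to-right scan
-- trying the four tokens at each position (objective: alternative single-pass algorithm).

-- ===== PORT A =====
-- the modification mapping, in dict insertion order
def pvMappingA : List (String × String) :=
  [("C(+57.02)", "C+57.021"), ("M(+15.99)", "M+15.995"), ("N(+.98)", "N+0.984"), ("Q(+.98)", "Q+0.984")]

def translate_modifications (sequence : String) : String :=
  pvMappingA.foldl (fun s kv => PySem.Str.replace s kv.1 kv.2) sequence

-- ===== PORT B =====
-- the four keys and values of Source B's dict, as char lists
def pvK1 : List Char := "C(+57.02)".toList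
def pvV1 : List Char := "C+57.021".toList
def pvK2 : List Char := "M(+15.99)".toList
def pvV2 : List Char := "M+15.995".toList
def pvK3 : List Char := "N(+.98)".toList
def pvV3 : List Char := "N+0.984".toList
def pvK4 : List Char := "Q(+.98)".toList
def pvV4 : List Char := "Q+0.984".toList

-- Source B's while-loop: at each position try the keys in dict order (startswith); on a match
-- emit the value and skip the key's length, otherwise emit the character and advance by one.
def pvScanB : List Char → List Char
  | [] => []
  | c :: t =>
    if pvK1 <+: (c :: t) then pvV1 ++ pvScanB (t.drop 8)
    else if pvK2 <+: (c :: t) then pvV2 ++ pvScanB (t.drop 8)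
    else if pvK3 <+: (c :: t) then pvV3 ++ pvScanB (t.drop 6)
    else if pvK4 <+: (c :: t) then pvV4 ++ pvScanB (t.drop 6)
    else c :: pvScanB t
  termination_by l => l.length
  decreasing_by all_goals (simp [List.length_drop]; try omega)

def translate_modifications_alt (sequence : String) : String :=
  String.ofList (pvScanB sequence.toList)

-- ===== PRECONDITION & SPEC =====
def Spec_translate_modifications (sequence : String) (out : String) : Prop := out = translate_modifications_alt sequence
instance (sequence : String) (out : String) : Decidable (Spec_translate_modifications sequence out) := by unfold Spec_translate_modifications; infer_instance

-- ===== CLAIM (what is proved, stated in full; the proofs are below) =====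
def Claim_equal_translate_modifications : Prop := ∀ (sequence : String), Dom_translate_modifications sequence → Spec_translate_modifications sequence (translate_modifications sequence)

-- ===== LEMMAS AND PROOFS =====

-- clean recursive characterisation of Python's s.replace(old, new) for old ≠ ''
def pvRepl (old new : List Char) : List Char → List Char
  | [] => []
  | c :: t =>
    if old <+: (c :: t) then new ++ pvRepl old new (t.drop (old.length - 1))
    else c :: pvRepl old new t
  termination_by l => l.length
  decreasing_by all_goals (simp [List.length_drop]; try omega)

-- "k cannot match starting inside u": no nonempty suffix of u is prefix-compatible with k
def pvNoOvB (u k : List Char) : Bool :=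
  u.tails.all fun p => p.isEmpty || (!p.isPrefixOf k && !k.isPrefixOf p)

theorem pvNoOv_spec {u k : List Char} (h : pvNoOvB u k = true) :
    ∀ p, p <:+ u → p ≠ [] → ¬ p <+: k ∧ ¬ k <+: p := by
  intro p hs hne
  have hp := (List.all_eq_true.mp h) p ((List.mem_tails p u).mpr hs)
  rcases p with _ | ⟨a, p'⟩
  · exact absurd rfl hne
  · simp only [List.isEmpty_cons, Bool.false_or, Bool.and_eq_true, Bool.not_eq_true'] at hp
    exact ⟨fun hpre => by simp [List.isPrefixOf_iff_prefix.mpr hpre] at hp,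
           fun hpre => by simp [List.isPrefixOf_iff_prefix.mpr hpre] at hp⟩

theorem pvRepl_append (k v u : List Char)
    (hno : ∀ p, p <:+ u → p ≠ [] → ¬ p <+: k ∧ ¬ k <+: p) :
    ∀ x, pvRepl k v (u ++ x) = u ++ pvRepl k v x := by
  induction u with
  | nil => intro x; simp
  | cons a u' ih =>
    intro x
    have hnk : ¬ k <+: (a :: u') ++ x := by
      intro hk
      rcases Nat.lt_or_ge (a :: u').length k.length with hlt | hle
      · exact (hno (a :: u') (List.suffix_refl _) (by simp)).1
          (List.prefix_of_prefix_length_le (List.prefix_append _ _) hk (Nat.le_of_lt hlt))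
      · exact (hno (a :: u') (List.suffix_refl _) (by simp)).2
          (List.prefix_of_prefix_length_le hk (List.prefix_append _ _) hle)
    rw [List.cons_append, pvRepl, if_neg (by simpa using hnk),
        ih (fun p hs hne => hno p (hs.trans (List.suffix_cons a u')) hne) x]
    rfl

theorem pvRepl_head (k v x : List Char) (hk : k ≠ []) :
    pvRepl k v (k ++ x) = v ++ pvRepl k v x := by
  rcases k with _ | ⟨a, k'⟩
  · exact absurd rfl hk
  · rw [List.cons_append, pvRepl,
        if_pos (show a :: k' <+: a :: (k' ++ x) by exact List.prefix_append _ _)]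
    simp

theorem pvTransfer (k v q : List Char)
    (hno : ∀ p, p <:+ q → p ≠ [] → ¬ p <+: v ∧ ¬ v <+: p) :
    ∀ s p, p <:+ q → p ≠ [] → p <+: pvRepl k v s → p <+: s := by
  intro s
  induction s using pvRepl.induct k with
  | case1 =>
    intro p _ hne hp
    rw [pvRepl] at hp
    exact absurd (List.prefix_nil.mp hp) hne
  | case2 c t hmatch _ =>
    intro p hs hne hp
    rw [pvRepl, if_pos hmatch] at hp
    rcases Nat.lt_or_ge v.length p.length with hlt | hle
    · exact absurd (List.prefix_of_prefix_length_le (List.prefix_append _ _) hp (Nat.le_of_lt hlt))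
        (hno p hs hne).2
    · exact absurd (List.prefix_of_prefix_length_le hp (List.prefix_append _ _) hle)
        (hno p hs hne).1
  | case3 c t hmatch ih =>
    intro p hs hne hp
    rw [pvRepl, if_neg hmatch] at hp
    rcases p with _ | ⟨a, p'⟩
    · exact absurd rfl hne
    obtain ⟨hac, hp'⟩ := List.cons_prefix_cons.mp hp
    rcases p' with _ | ⟨b, p''⟩
    · exact List.cons_prefix_cons.mpr ⟨hac, List.nil_prefix⟩
    · exact List.cons_prefix_cons.mpr
        ⟨hac, ih (b :: p'') ((List.suffix_cons a (b :: p'')).trans hs) (by simp) hp'⟩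

-- relate PySem's replace to pvRepl
theorem pvGo_eq (o : Char) (os new : List Char) :
    ∀ fuel l acc, l.length ≤ fuel →
      PySem.Chars.replace.go (o :: os) new fuel l acc = acc.reverse ++ pvRepl (o :: os) new l := by
  intro fuel
  induction fuel with
  | zero =>
    intro l acc hl
    have : l = [] := List.length_eq_zero_iff.mp (Nat.le_zero.mp hl)
    subst this
    simp [PySem.Chars.replace.go, pvRepl]
  | succ n ihn =>
    intro l acc hl
    rcases l with _ | ⟨c, t⟩
    · simp [PySem.Chars.replace.go, pvRepl]
    · rw [PySem.Chars.replace.go]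
      by_cases hpre : (o :: os) <+: (c :: t)
      · rw [if_pos (List.isPrefixOf_iff_prefix.mpr hpre)]
        have hlen : (List.drop (o :: os).length (c :: t)).length ≤ n := by
          simp at hl ⊢; omega
        rw [ihn _ _ hlen, pvRepl, if_pos hpre]
        simp [List.drop_succ_cons]
      · rw [if_neg (by simpa using (fun h => hpre (List.isPrefixOf_iff_prefix.mp h)))]
        have hlen : t.length ≤ n := by simp at hl; omega
        rw [ihn _ _ hlen, pvRepl, if_neg hpre]
        simp

theorem pvReplace_eq (s old new : List Char) (hk : old ≠ []) :
    PySem.Chars.replace s old new = pvRepl old new s := by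
  rcases old with _ | ⟨o, os⟩
  · exact absurd rfl hk
  · rw [PySem.Chars.replace, if_neg (by simp)]
    simpa using pvGo_eq o os new s.length s [] (Nat.le_refl _)

theorem pvMain : ∀ cs, pvRepl pvK4 pvV4 (pvRepl pvK3 pvV3 (pvRepl pvK2 pvV2 (pvRepl pvK1 pvV1 cs))) = pvScanB cs := by
  intro cs
  induction hn : cs.length using Nat.strong_induction_on generalizing cs with
  | _ n IHn =>
  subst hn
  have IH : ∀ ds : List Char, ds.length < cs.length →
      pvRepl pvK4 pvV4 (pvRepl pvK3 pvV3 (pvRepl pvK2 pvV2 (pvRepl pvK1 pvV1 ds))) = pvScanB ds :=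
    fun ds h => IHn ds.length h ds rfl
  rcases cs with _ | ⟨c, t⟩
  · simp [pvRepl, pvScanB]
  by_cases h1 : pvK1 <+: (c :: t)
  · obtain ⟨rest, hrest⟩ := h1
    have htail : pvK1.tail ++ rest = t := by
      have := congrArg List.tail hrest; simpa [pvK1] using this
    have hdrop : t.drop 8 = rest := by
      rw [← htail, show (8 : Nat) = pvK1.tail.length from by decide, List.drop_left]
    have hlt : rest.length < (c :: t).length := by
      have := congrArg List.length hrest; simp [pvK1] at this; simp; omega
    rw [← hrest, pvRepl_head pvK1 pvV1 rest (by decide),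
        pvRepl_append pvK2 pvV2 pvV1 (pvNoOv_spec (by decide)),
        pvRepl_append pvK3 pvV3 pvV1 (pvNoOv_spec (by decide)),
        pvRepl_append pvK4 pvV4 pvV1 (pvNoOv_spec (by decide)),
        IH rest hlt, hrest, pvScanB, if_pos ⟨rest, hrest⟩, hdrop]
  by_cases h2 : pvK2 <+: (c :: t)
  · obtain ⟨rest, hrest⟩ := h2
    have htail : pvK2.tail ++ rest = t := by
      have := congrArg List.tail hrest; simpa [pvK2] using this
    have hdrop : t.drop 8 = rest := by
      rw [← htail, show (8 : Nat) = pvK2.tail.length from by decide, List.drop_left]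
    have hlt : rest.length < (c :: t).length := by
      have := congrArg List.length hrest; simp [pvK2] at this; simp; omega
    rw [← hrest, pvRepl_append pvK1 pvV1 pvK2 (pvNoOv_spec (by decide)),
        pvRepl_head pvK2 pvV2 _ (by decide),
        pvRepl_append pvK3 pvV3 pvV2 (pvNoOv_spec (by decide)),
        pvRepl_append pvK4 pvV4 pvV2 (pvNoOv_spec (by decide)),
        IH rest hlt, hrest, pvScanB, if_neg h1, if_pos ⟨rest, hrest⟩, hdrop]
  by_cases h3 : pvK3 <+: (c :: t)
  · obtain ⟨rest, hrest⟩ := h3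
    have htail : pvK3.tail ++ rest = t := by
      have := congrArg List.tail hrest; simpa [pvK3] using this
    have hdrop : t.drop 6 = rest := by
      rw [← htail, show (6 : Nat) = pvK3.tail.length from by decide, List.drop_left]
    have hlt : rest.length < (c :: t).length := by
      have := congrArg List.length hrest; simp [pvK3] at this; simp; omega
    rw [← hrest, pvRepl_append pvK1 pvV1 pvK3 (pvNoOv_spec (by decide)),
        pvRepl_append pvK2 pvV2 pvK3 (pvNoOv_spec (by decide)),
        pvRepl_head pvK3 pvV3 _ (by decide),
        pvRepl_append pvK4 pvV4 pvV3 (pvNoOv_spec (by decide)),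
        IH rest hlt, hrest, pvScanB, if_neg h1, if_neg h2, if_pos ⟨rest, hrest⟩, hdrop]
  by_cases h4 : pvK4 <+: (c :: t)
  · obtain ⟨rest, hrest⟩ := h4
    have htail : pvK4.tail ++ rest = t := by
      have := congrArg List.tail hrest; simpa [pvK4] using this
    have hdrop : t.drop 6 = rest := by
      rw [← htail, show (6 : Nat) = pvK4.tail.length from by decide, List.drop_left]
    have hlt : rest.length < (c :: t).length := by
      have := congrArg List.length hrest; simp [pvK4] at this; simp; omega
    rw [← hrest, pvRepl_append pvK1 pvV1 pvK4 (pvNoOv_spec (by decide)),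
        pvRepl_append pvK2 pvV2 pvK4 (pvNoOv_spec (by decide)),
        pvRepl_append pvK3 pvV3 pvK4 (pvNoOv_spec (by decide)),
        pvRepl_head pvK4 pvV4 _ (by decide),
        IH rest hlt, hrest, pvScanB, if_neg h1, if_neg h2, if_neg h3, if_pos ⟨rest, hrest⟩, hdrop]
  -- no key matches at the current position
  have e1 : pvRepl pvK1 pvV1 (c :: t) = c :: pvRepl pvK1 pvV1 t := by
    rw [pvRepl, if_neg h1]
  have h2' : ¬ pvK2 <+: (c :: pvRepl pvK1 pvV1 t) := by
    rw [← e1]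
    exact fun h => h2 (pvTransfer pvK1 pvV1 pvK2 (pvNoOv_spec (by decide)) _ pvK2
      (List.suffix_refl _) (by decide) h)
  have e2 : pvRepl pvK2 pvV2 (c :: pvRepl pvK1 pvV1 t) = c :: pvRepl pvK2 pvV2 (pvRepl pvK1 pvV1 t) := by
    rw [pvRepl, if_neg h2']
  have h3' : ¬ pvK3 <+: (c :: pvRepl pvK2 pvV2 (pvRepl pvK1 pvV1 t)) := by
    rw [← e2, ← e1]
    exact fun h => h3 (pvTransfer pvK1 pvV1 pvK3 (pvNoOv_spec (by decide)) _ pvK3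
      (List.suffix_refl _) (by decide)
      (pvTransfer pvK2 pvV2 pvK3 (pvNoOv_spec (by decide)) _ pvK3 (List.suffix_refl _) (by decide) h))
  have e3 : pvRepl pvK3 pvV3 (c :: pvRepl pvK2 pvV2 (pvRepl pvK1 pvV1 t))
      = c :: pvRepl pvK3 pvV3 (pvRepl pvK2 pvV2 (pvRepl pvK1 pvV1 t)) := by
    rw [pvRepl, if_neg h3']
  have h4' : ¬ pvK4 <+: (c :: pvRepl pvK3 pvV3 (pvRepl pvK2 pvV2 (pvRepl pvK1 pvV1 t))) := by
    rw [← e3, ← e2, ← e1]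
    exact fun h => h4 (pvTransfer pvK1 pvV1 pvK4 (pvNoOv_spec (by decide)) _ pvK4
      (List.suffix_refl _) (by decide)
      (pvTransfer pvK2 pvV2 pvK4 (pvNoOv_spec (by decide)) _ pvK4 (List.suffix_refl _) (by decide)
        (pvTransfer pvK3 pvV3 pvK4 (pvNoOv_spec (by decide)) _ pvK4 (List.suffix_refl _) (by decide) h)))
  have e4 : pvRepl pvK4 pvV4 (c :: pvRepl pvK3 pvV3 (pvRepl pvK2 pvV2 (pvRepl pvK1 pvV1 t)))
      = c :: pvRepl pvK4 pvV4 (pvRepl pvK3 pvV3 (pvRepl pvK2 pvV2 (pvRepl pvK1 pvV1 t))) := by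
    rw [pvRepl, if_neg h4']
  rw [e1, e2, e3, e4, IH t (by simp), pvScanB, if_neg h1, if_neg h2, if_neg h3, if_neg h4]

-- ===== VERDICT (by name: the statement is the Claim_ definition above) =====
theorem translate_modifications_spec : Claim_equal_translate_modifications := by
  intro s _
  show translate_modifications s = translate_modifications_alt s
  unfold translate_modifications translate_modifications_alt pvMappingA
  simp only [List.foldl_cons, List.foldl_nil, PySem.Str.replace, String.toList_ofList]
  rw [pvReplace_eq _ _ _ (by decide), pvReplace_eq _ _ _ (by decide),
      pvReplace_eq _ _ _ (by decide), pvReplace_eq _ _ _ (by decide)]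
  exact congrArg String.ofList (pvMain s.toList)
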